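-- pv_equiv track=rewrite | github.com/poorna1995/Data-Strucutres-and-Algorithm | week3/random.py/random.py | process_array
-- ===== SOURCE A (Python) =====
-- def process_array(a):
--     n=len(a)
--     result=0
--     for i in range(0,n):
--         for j in range(i+1,n):
--             if a[i]-a[j]==30:
--                 return 1
--             else:
--                 result=result+(a[i]-a[j])
--     return result
-- ===== SOURCE B (Python) =====
-- def process_array(a):
--     n = len(a)
--     seen = set()
--     total = 0
--     for j, x in enumerate(a):
--         if x + 30 in seen:
--             return 1
--         seen.add(x)
--         total += x * (n - 1 - 2 * j)
--     return total
-- ===== Notes on version B (the rewrite author's own statement) =====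
-- stated objective: faster
-- what changed: Replaced the nested pair loop by a single pass that checks a[j]+30 against a set of earlier elements and accumulates the pairwise-difference sum in closed form as sum of a[j]*(n-1-2j).
import Mathlib
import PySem

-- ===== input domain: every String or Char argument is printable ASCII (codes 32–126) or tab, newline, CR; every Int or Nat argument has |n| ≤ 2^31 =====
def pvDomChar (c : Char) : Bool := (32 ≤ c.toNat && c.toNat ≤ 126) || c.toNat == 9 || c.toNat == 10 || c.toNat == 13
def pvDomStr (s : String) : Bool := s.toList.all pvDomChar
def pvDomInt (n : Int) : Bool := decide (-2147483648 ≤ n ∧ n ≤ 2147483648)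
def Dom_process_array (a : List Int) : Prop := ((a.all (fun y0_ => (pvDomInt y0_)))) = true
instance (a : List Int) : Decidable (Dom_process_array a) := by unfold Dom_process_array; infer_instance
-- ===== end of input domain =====

-- B replaces A's O(n^2) nested pair loop by a single pass: a set of earlier
-- elements detects a pair with difference 30, and the pairwise-difference sum
-- is accumulated in closed form as Σ a[j]*(n-1-2j). Return value only.

-- ===== PORT A =====
-- inner j-loop over the elements after a[i]; none = early 'return 1'
def pvInnerA (ai : Int) : List Int → Int → Option Int
  | [], r => some r
  | y :: ys, r => if ai - y = 30 then none else pvInnerA ai ys (r + (ai - y))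

-- outer i-loop: a[i] is the head, the js are the tail
def pvOuterA : List Int → Int → Int
  | [], r => r
  | x :: xs, r =>
    match pvInnerA x xs r with
    | none => 1
    | some r' => pvOuterA xs r'

def process_array (a : List Int) : Int := pvOuterA a 0

-- ===== PORT B =====
-- the single 'for j, x in enumerate(a)' loop; early 'return 1' on membership
def pvGoB (n : Int) : Int → List Int → PySem.Set Int → Int → Int
  | _, [], _, total => total
  | j, x :: rest, seen, total =>
    if PySem.Set.contains seen (x + 30) then 1
    else pvGoB n (j + 1) rest (PySem.Set.add seen x) (total + x * (n - 1 - 2 * j))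

def process_array_alt (a : List Int) : Int :=
  pvGoB (a.length : Int) 0 a PySem.Set.empty 0

-- ===== PRECONDITION & SPEC =====
def Spec_process_array (a : List Int) (out : Int) : Prop := out = process_array_alt a
instance (a : List Int) (out : Int) : Decidable (Spec_process_array a out) := by unfold Spec_process_array; infer_instance

-- ===== CLAIM (what is proved, stated in full; the proofs are below) =====
def Claim_equal_process_array : Prop := ∀ (a : List Int), Dom_process_array a → Spec_process_array a (process_array a)

-- ===== LEMMAS AND PROOFS =====

-- reference predicates/values
def pvHasPair : List Int → Bool
  | [] => false
  | x :: xs => xs.any (fun y => x - y = 30) || pvHasPair xs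

def pvPairSum : List Int → Int
  | [] => 0
  | x :: xs => (xs.map (fun y => x - y)).sum + pvPairSum xs

def pvWSum (n : Int) : Int → List Int → Int
  | _, [] => 0
  | j, x :: xs => x * (n - 1 - 2 * j) + pvWSum n (j + 1) xs

-- B's cross-check with an explicit list of already-seen elements
def pvCross : List Int → List Int → Bool
  | _, [] => false
  | p, x :: xs => p.any (fun y => y = x + 30) || pvCross (x :: p) xs

-- ---- A-side characterisation ----
theorem pvInnerA_eq (ai : Int) (js : List Int) (r : Int) :
    pvInnerA ai js r =
      if js.any (fun y => ai - y = 30) then none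
      else some (r + (js.map (fun y => ai - y)).sum) := by
  induction js generalizing r with
  | nil => simp [pvInnerA]
  | cons y ys ih =>
    simp only [pvInnerA, List.any_cons, List.map_cons, List.sum_cons]
    by_cases h : ai - y = 30
    · simp [h]
    · simp only [h, ih]
      split_ifs with h2 <;> simp_all <;> ring_nf

theorem pvOuterA_eq (a : List Int) (r : Int) :
    pvOuterA a r = if pvHasPair a then 1 else r + pvPairSum a := by
  induction a generalizing r with
  | nil => simp [pvOuterA, pvHasPair, pvPairSum]
  | cons x xs ih =>
    simp only [pvOuterA, pvInnerA_eq, pvHasPair, pvPairSum]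
    by_cases h : xs.any (fun y => x - y = 30)
    · simp [h]
    · simp only [h, Bool.false_or, ih]
      split_ifs with h2 <;> simp_all <;> ring_nf

-- ---- B-side characterisation ----
theorem pvCross_iff (l p : List Int) :
    pvCross p l = true ↔ (∃ x ∈ l, x + 30 ∈ p) ∨ pvHasPair l = true := by
  induction l generalizing p with
  | nil => simp [pvCross, pvHasPair]
  | cons x xs ih =>
    simp only [pvCross, pvHasPair, Bool.or_eq_true, List.any_eq_true, ih,
      List.mem_cons, decide_eq_true_eq]
    constructor
    · rintro (⟨y, hy, rfl⟩ | ⟨z, hz, hmem⟩ | hp)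
      · exact Or.inl ⟨x, Or.inl rfl, hy⟩
      · rcases hmem with h | h
        · exact Or.inr (Or.inl ⟨z, hz, by omega⟩)
        · exact Or.inl ⟨z, Or.inr hz, h⟩
      · exact Or.inr (Or.inr hp)
    · rintro (⟨z, hz | hz, hmem⟩ | ⟨z, hz, h30⟩ | hp)
      · exact Or.inl ⟨x + 30, by simpa [hz] using hmem, rfl⟩
      · exact Or.inr (Or.inl ⟨z, hz, Or.inr hmem⟩)
      · exact Or.inr (Or.inl ⟨z, hz, Or.inl (by omega)⟩)
      · exact Or.inr (Or.inr hp)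

theorem pvGoB_eq (l : List Int) (n : Int) (j total : Int) (seen : PySem.Set Int)
    (p : List Int) (hseen : ∀ y, y ∈ seen ↔ y ∈ p) :
    pvGoB n j l seen total = if pvCross p l then 1 else total + pvWSum n j l := by
  induction l generalizing j total seen p with
  | nil => simp [pvGoB, pvCross, pvWSum]
  | cons x xs ih =>
    simp only [pvGoB, pvCross, pvWSum]
    by_cases h : x + 30 ∈ p
    · have hcon : PySem.Set.contains seen (x + 30) = true := by
        rw [PySem.Set.contains_iff, hseen]; exact h
      have hany : p.any (fun y => y = x + 30) = true := by
        simp only [List.any_eq_true, decide_eq_true_eq]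
        exact ⟨x + 30, h, rfl⟩
      rw [hcon, hany]
      simp
    · have hc : PySem.Set.contains seen (x + 30) = false := by
        cases hb : PySem.Set.contains seen (x + 30) with
        | false => rfl
        | true =>
          rw [PySem.Set.contains_iff, hseen] at hb
          exact absurd hb h
      have hadd : ∀ y, y ∈ PySem.Set.add seen x ↔ y ∈ (x :: p) := by
        intro y
        rw [PySem.Set.mem_add, hseen, List.mem_cons]
        tauto
      rw [hc]
      simp only [Bool.false_eq_true, if_false]
      rw [ih (j + 1) _ _ (x :: p) hadd]
      have hany : (p.any (fun y => y = x + 30)) = false := by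
        simp only [List.any_eq_false, decide_eq_true_eq]
        intro y hy hyx; exact h (hyx ▸ hy)
      rw [hany]
      split_ifs with h2 <;> simp_all <;> ring_nf

-- ---- sum identities ----
theorem pvWSum_shift (l : List Int) (n j : Int) :
    pvWSum n (j + 1) l = pvWSum (n - 2) j l := by
  induction l generalizing j with
  | nil => simp [pvWSum]
  | cons x xs ih =>
    simp only [pvWSum, ih]
    ring_nf

theorem pvWSum_pred (l : List Int) (n j : Int) :
    pvWSum (n - 1) j l = pvWSum n j l - l.sum := by
  induction l generalizing j with
  | nil => simp [pvWSum]
  | cons x xs ih =>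
    simp only [pvWSum, ih, List.sum_cons]
    ring_nf

theorem pvMapSub_sum (x : Int) (xs : List Int) :
    (xs.map (fun y => x - y)).sum = x * xs.length - xs.sum := by
  induction xs with
  | nil => simp
  | cons y ys ih =>
    simp only [List.map_cons, List.sum_cons, ih, List.length_cons]
    push_cast
    ring_nf

theorem pvPairSum_eq_wsum (l : List Int) :
    pvPairSum l = pvWSum (l.length : Int) 0 l := by
  induction l with
  | nil => simp [pvPairSum, pvWSum]
  | cons x xs ih =>
    simp only [pvPairSum, pvWSum, List.length_cons, pvMapSub_sum]
    have hc : ((xs.length + 1 : Nat) : Int) - 2 = (xs.length : Int) - 1 := by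
      push_cast; ring
    rw [pvWSum_shift, hc, pvWSum_pred, ← ih]
    push_cast
    ring

-- ===== VERDICT (by name: the statement is the Claim_ definition above) =====
theorem process_array_spec : Claim_equal_process_array := by
  intro a _
  unfold Spec_process_array process_array process_array_alt
  rw [pvOuterA_eq, pvGoB_eq a (a.length : Int) 0 0 PySem.Set.empty []
    (by intro y; simp [PySem.Set.empty])]
  have hcross : pvCross [] a = pvHasPair a := by
    by_cases h : pvHasPair a = true
    · rw [h, (pvCross_iff a []).mpr (Or.inr h)]
    · rw [Bool.eq_false_iff.mpr h]
      rw [Bool.eq_false_iff]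
      intro hc
      rcases (pvCross_iff a []).mp hc with ⟨_, _, hmem⟩ | hp
      · simp at hmem
      · exact h hp
  rw [hcross, ← pvPairSum_eq_wsum]
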